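-- pv_equiv track=rewrite | github.com/sebong-sg/Job_Candidate_Matcher | src/resume_parser_V22.1Nov.py | _detect_scope_level
-- ===== SOURCE A (Python) =====
-- def _detect_scope_level(role_title):
--     """Detect scope level from role title (fallback method)"""
--     role_lower = role_title.lower()
--
--     if any(term in role_lower for term in ['cto', 'chief', 'vp', 'vice president']):
--         return 4  # organization_lead
--     elif any(term in role_lower for term in ['director', 'head of']):
--         return 3  # department_head
--     elif any(term in role_lower for term in ['manager', 'lead', 'team lead']):
--         return 2  # team_lead
--     else:
--         return 1  # individual_contributor
-- ===== SOURCE B (Python) =====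
-- _KEYWORD_LEVELS = {
--     'cto': 4, 'chief': 4, 'vp': 4, 'vice president': 4,   # organization_lead
--     'director': 3, 'head of': 3,                          # department_head
--     'manager': 2, 'lead': 2, 'team lead': 2,              # team_lead
-- }
--
-- def _detect_scope_level(role_title):
--     """Detect scope level from role title (fallback method).
--
--     Correct because A's descending if/elif cascade returns exactly the highest
--     level whose keyword list matches, i.e. the maximum matched level (else 1).
--     """
--     role_lower = role_title.lower()
--     return max((lvl for kw, lvl in _KEYWORD_LEVELS.items() if kw in role_lower),
--                default=1)
-- ===== Notes on version B (the rewrite author's own statement) =====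
-- stated objective: alternative
-- what changed: Replaces the descending if/elif cascade (first matching tier wins) with a single max-fold over a flat keyword-to-level map, relying on the fact that the cascade's answer is exactly the maximum matched level with default 1.
import Mathlib
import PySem

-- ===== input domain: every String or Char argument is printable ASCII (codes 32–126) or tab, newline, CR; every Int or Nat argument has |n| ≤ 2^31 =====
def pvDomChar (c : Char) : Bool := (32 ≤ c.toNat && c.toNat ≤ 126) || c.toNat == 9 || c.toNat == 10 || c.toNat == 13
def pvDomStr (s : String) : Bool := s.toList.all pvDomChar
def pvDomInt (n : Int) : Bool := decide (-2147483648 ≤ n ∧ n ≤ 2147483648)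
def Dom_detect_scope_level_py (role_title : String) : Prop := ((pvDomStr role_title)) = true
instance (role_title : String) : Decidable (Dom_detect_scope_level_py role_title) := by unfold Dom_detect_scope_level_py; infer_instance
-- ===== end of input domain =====

-- B replaces A's descending if/elif keyword cascade with a max-fold over a flat
-- keyword->level map (objective: alternative); same cost, same return values.

-- ===== PORT A =====
def detect_scope_level_py (role_title : String) : Int :=
  let role_lower := PySem.Str.lower role_title
  if ["cto", "chief", "vp", "vice president"].any (fun term => PySem.Str.isIn term role_lower) then
    4  -- organization_lead
  else if ["director", "head of"].any (fun term => PySem.Str.isIn term role_lower) then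
    3  -- department_head
  else if ["manager", "lead", "team lead"].any (fun term => PySem.Str.isIn term role_lower) then
    2  -- team_lead
  else
    1  -- individual_contributor

-- ===== PORT B =====
def pvKeywordLevels : List (String × Int) :=
  [("cto", 4), ("chief", 4), ("vp", 4), ("vice president", 4),
   ("director", 3), ("head of", 3),
   ("manager", 2), ("lead", 2), ("team lead", 2)]

-- Python's `max(gen, default=1)` over the matched levels, ported as a max-fold
-- seeded with the default 1 (exact here since every level in the map exceeds 1).
def detect_scope_level_py_alt (role_title : String) : Int :=
  let role_lower := PySem.Str.lower role_title
  ((pvKeywordLevels.filter (fun p => PySem.Str.isIn p.1 role_lower)).map Prod.snd).foldl max 1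

-- ===== PRECONDITION & SPEC =====
def Spec_detect_scope_level_py (role_title : String) (out : Int) : Prop := out = detect_scope_level_py_alt role_title
instance (role_title : String) (out : Int) : Decidable (Spec_detect_scope_level_py role_title out) := by unfold Spec_detect_scope_level_py; infer_instance

-- ===== CLAIM =====
def Claim_equal_detect_scope_level_py : Prop := ∀ (role_title : String), Dom_detect_scope_level_py role_title → Spec_detect_scope_level_py role_title (detect_scope_level_py role_title)

-- ===== LEMMAS AND PROOFS =====

set_option maxHeartbeats 1000000 in
theorem pvCascadeEqMaxFold (g : String → Bool) :
    (if (g "cto" || (g "chief" || (g "vp" || (g "vice president" || false)))) = true then (4 : Int)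
     else if (g "director" || (g "head of" || false)) = true then 3
     else if (g "manager" || (g "lead" || (g "team lead" || false))) = true then 2
     else 1)
      = ((pvKeywordLevels.filter (fun p => g p.1)).map Prod.snd).foldl max 1 := by
  cases h1 : g "cto" <;> cases h2 : g "chief" <;> cases h3 : g "vp" <;>
    cases h4 : g "vice president" <;> cases h5 : g "director" <;> cases h6 : g "head of" <;>
    cases h7 : g "manager" <;> cases h8 : g "lead" <;> cases h9 : g "team lead" <;>
    simp [pvKeywordLevels, h1, h2, h3, h4, h5, h6, h7, h8, h9]

-- ===== VERDICT =====
theorem detect_scope_level_py_spec : Claim_equal_detect_scope_level_py := by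
  intro role_title _
  unfold Spec_detect_scope_level_py detect_scope_level_py detect_scope_level_py_alt pvKeywordLevels
  simp only [List.any_cons, List.any_nil]
  exact pvCascadeEqMaxFold (fun term => PySem.Str.isIn term (PySem.Str.lower role_title))
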